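-- pv_equiv track=rewrite | github.com/chaoxue-sysu/blog | Techo/Algorithm/src/base_code.py | encode_base
-- ===== SOURCE A (Python) =====
-- def encode_base(bits):
--     byte=0
--     new_bit=[]
--     for i in range(len(bits)-4):
--         new_bit.append(0)
--     for bit in bits:
--         new_bit.append(bit)
--
--     for i in range(len(new_bit)):
--         byte+=new_bit[i]*2**(int(len(new_bit)-i-1)*2)
--     return byte
-- ===== SOURCE B (Python) =====
-- def encode_base(bits):
--     # Horner's method: one left-to-right pass, byte = byte*4 + bit.
--     # Leading zero-padding in A never changes the value.
--     byte = 0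
--     for bit in bits:
--         byte = byte * 4 + bit
--     return byte
-- ===== Notes on version B (the rewrite author's own statement) =====
-- stated objective: faster
-- what changed: Replaces the pad-then-sum-of-powers loop (recomputing 2**(2k) for every position) with a single Horner pass byte = byte*4 + bit.
import Mathlib
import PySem

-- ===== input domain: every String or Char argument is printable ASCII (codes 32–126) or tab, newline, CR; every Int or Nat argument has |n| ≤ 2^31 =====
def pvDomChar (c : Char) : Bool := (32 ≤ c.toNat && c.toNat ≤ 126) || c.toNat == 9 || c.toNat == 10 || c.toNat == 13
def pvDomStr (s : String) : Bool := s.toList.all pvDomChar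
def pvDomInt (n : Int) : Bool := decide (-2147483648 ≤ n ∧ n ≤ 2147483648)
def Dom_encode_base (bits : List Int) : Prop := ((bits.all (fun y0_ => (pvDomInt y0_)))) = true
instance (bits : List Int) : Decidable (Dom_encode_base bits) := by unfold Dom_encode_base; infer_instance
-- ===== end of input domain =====

-- B replaces A's pad-then-sum-of-powers with a single Horner pass (byte = byte*4 + bit).

-- ===== PORT A =====
def encode_base (bits : List Int) : Int :=
  let pad : List Int :=
    (PySem.List.pyRange 0 ((bits.length : Int) - 4) 1).foldl (fun nb _ => nb ++ [(0 : Int)]) []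
  let new_bit : List Int := bits.foldl (fun nb b => nb ++ [b]) pad
  (PySem.List.pyRange 0 (new_bit.length : Int) 1).foldl
    (fun byte i =>
      byte + PySem.List.pyGetD new_bit i 0 * 2 ^ ((((new_bit.length : Int) - i - 1).toNat) * 2)) 0

-- ===== PORT B =====
def encode_base_alt (bits : List Int) : Int :=
  bits.foldl (fun byte bit => byte * 4 + bit) 0

-- ===== PRECONDITION & SPEC =====
def Spec_encode_base (bits : List Int) (out : Int) : Prop := out = encode_base_alt bits
instance (bits : List Int) (out : Int) : Decidable (Spec_encode_base bits out) := by unfold Spec_encode_base; infer_instance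

-- ===== CLAIM (what is proved, stated in full; the proofs are below) =====
def Claim_equal_encode_base : Prop := ∀ (bits : List Int), Dom_encode_base bits → Spec_encode_base bits (encode_base bits)

-- ===== LEMMAS AND PROOFS =====

-- Horner fold of a list of zeros from accumulator 0 stays 0.
theorem horner_zeros (l : List α) :
    (l.map (fun _ => (0 : Int))).foldl (fun a b => a * 4 + b) 0 = 0 := by
  induction l with
  | nil => rfl
  | cons x t ih => simpa using ih

-- A's positional-power sum over any list equals the Horner value, with a power offset e.
theorem powsum_eq_horner (l : List Int) (e : Nat) (acc : Int) :
    (PySem.List.pyRange 0 (l.length : Int) 1).foldl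
      (fun byte i => byte + PySem.List.pyGetD l i 0 * 2 ^ ((((l.length : Int) - i - 1).toNat + e) * 2)) acc
    = acc + (l.foldl (fun a b => a * 4 + b) 0) * 4 ^ e := by
  induction l using List.reverseRecOn generalizing e acc with
  | nil => simp [PySem.List.pyRange_one_eq_nil]
  | append_singleton l' x ih =>
    have hlen : ((l' ++ [x]).length : Int) = (l'.length : Int) + 1 := by simp
    rw [hlen, PySem.List.pyRange_one_succ_right (by positivity), List.foldl_append]
    have hcongr :
        (PySem.List.pyRange 0 (l'.length : Int) 1).foldl
          (fun byte i => byte + PySem.List.pyGetD (l' ++ [x]) i 0 * 2 ^ ((((l'.length : Int) + 1 - i - 1).toNat + e) * 2)) acc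
        = (PySem.List.pyRange 0 (l'.length : Int) 1).foldl
          (fun byte i => byte + PySem.List.pyGetD l' i 0 * 2 ^ ((((l'.length : Int) - i - 1).toNat + (e + 1)) * 2)) acc := by
      apply PySem.List.foldl_congr_mem
      intro a i hi
      rw [PySem.List.mem_pyRange_one] at hi
      have h1 : PySem.List.pyGetD (l' ++ [x]) i 0 = PySem.List.pyGetD l' i 0 := by
        rw [PySem.List.pyGetD_eq_getElem _ 0 hi.1 (by simp; omega),
            PySem.List.pyGetD_eq_getElem _ 0 hi.1 (by simpa using hi.2)]
        rw [List.getElem_append_left]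
      have h2 : ((l'.length : Int) + 1 - i - 1).toNat + e = ((l'.length : Int) - i - 1).toNat + (e + 1) := by
        omega
      rw [h1, h2]
    rw [hcongr, ih (e + 1) acc]
    have hx : PySem.List.pyGetD (l' ++ [x]) ((l'.length : Int)) 0 = x := by
      rw [PySem.List.pyGetD_eq_getElem _ 0 (by exact_mod_cast Nat.zero_le _) (by simp)]
      simp
    have hexp : (((l'.length : Int) + 1 - (l'.length : Int) - 1).toNat + e) * 2 = e * 2 := by
      omega
    simp only [List.foldl_cons, List.foldl_nil, List.foldl_append, hx, hexp]
    have h4 : (2 : Int) ^ (e * 2) = 4 ^ e := by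
      rw [show (4 : Int) = 2 ^ 2 from rfl, ← pow_mul, Nat.mul_comm]
    rw [h4, pow_succ]
    ring

-- ===== VERDICT (by name: the statement is the Claim_ definition above) =====
theorem encode_base_spec : Claim_equal_encode_base := by
  intro bits _
  unfold Spec_encode_base encode_base encode_base_alt
  simp only [PySem.List.foldl_append_singleton_eq_map, List.map_id', List.nil_append]
  have key := powsum_eq_horner
    (((PySem.List.pyRange 0 ((bits.length : Int) - 4) 1).map (fun _ => (0 : Int))) ++ bits) 0 0
  simp only [Nat.add_zero, pow_zero, mul_one, zero_add] at key
  rw [key, List.foldl_append, horner_zeros]
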